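-- pv_equiv track=rewrite | github.com/gerrynek/text_analyzer | text_analysis.py | countOfOccurencies
-- ===== SOURCE A (Python) =====
-- def countOfOccurencies(data):
--     count_of_lengths = {}
--     count = 0
--     list_of_lengths=[]
--     for word in data:
--         list_of_lengths.append(len(word))
--
--     for length in list_of_lengths:
--         count = list_of_lengths.count(length)
--         count_of_lengths.update({length:count})
--
--     count_of_lengths_sorted = dict(sorted(count_of_lengths.items()))
--     return count_of_lengths_sorted
-- ===== SOURCE B (Python) =====
-- def countOfOccurencies(data):
--     # sort all word lengths once, then count consecutive runs in one scan
--     lengths = sorted(len(word) for word in data)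
--     result = {}
--     i = 0
--     n = len(lengths)
--     while i < n:
--         j = i
--         while j < n and lengths[j] == lengths[i]:
--             j += 1
--         result[lengths[i]] = j - i
--         i = j
--     return result
-- ===== Notes on version B (the rewrite author's own statement) =====
-- stated objective: faster
-- what changed: Replaces A's quadratic per-element list.count dict-building plus a final key sort with a single sort of the word lengths followed by one linear run-length scan over the sorted list (sort-then-group), which also leaves the keys already in ascending order.
import Mathlib
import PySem

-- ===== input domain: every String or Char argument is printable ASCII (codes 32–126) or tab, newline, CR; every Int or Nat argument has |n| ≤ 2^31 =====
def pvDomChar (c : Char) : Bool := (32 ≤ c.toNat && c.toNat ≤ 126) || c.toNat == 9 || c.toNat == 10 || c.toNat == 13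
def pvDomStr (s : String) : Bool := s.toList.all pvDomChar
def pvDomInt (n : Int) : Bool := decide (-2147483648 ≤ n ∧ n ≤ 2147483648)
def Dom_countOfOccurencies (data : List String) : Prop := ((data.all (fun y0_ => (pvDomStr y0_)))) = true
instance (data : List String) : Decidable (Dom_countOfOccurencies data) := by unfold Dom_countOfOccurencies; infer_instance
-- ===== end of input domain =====

-- B replaces A's quadratic list.count dict-building + final key sort with one sort of the
-- lengths followed by a single linear run-length scan (sort-then-group); measurably faster.


-- ===== PORT A =====
def countOfOccurencies (data : List String) : List (Int × Int) :=
  -- count_of_lengths = {}  (the dead 'count = 0' accumulator is overwritten before use)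
  let count_of_lengths : PySem.Dict Int Int := PySem.Dict.empty
  -- list_of_lengths = []; for word in data: list_of_lengths.append(len(word))
  let list_of_lengths : List Int := data.foldl (fun acc word => acc ++ [PySem.Str.len word]) []
  -- for length in list_of_lengths: count = list_of_lengths.count(length); count_of_lengths.update({length: count})
  let count_of_lengths := list_of_lengths.foldl
    (fun d length => d.insert length ((PySem.List.count list_of_lengths length : Nat) : Int))
    count_of_lengths
  -- count_of_lengths_sorted = dict(sorted(count_of_lengths.items()))
  let count_of_lengths_sorted : PySem.Dict Int Int :=
    PySem.Dict.ofList (PySem.List.sorted2 count_of_lengths.items (fun p => p.1) (fun p => p.2))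
  count_of_lengths_sorted.items

-- ===== PORT B =====
-- the inner 'while j < n and lengths[j] == lengths[i]' run scan of Source B
def groupRuns : List Int → List (Int × Int)
  | [] => []
  | x :: xs =>
    (x, 1 + ((xs.takeWhile (· == x)).length : Int)) :: groupRuns (xs.dropWhile (· == x))
  termination_by ms => ms.length
  decreasing_by
    simp only [List.length_cons]
    exact Nat.lt_succ_of_le (List.length_dropWhile_le _ _)

def countOfOccurencies_alt (data : List String) : List (Int × Int) :=
  -- lengths = sorted(len(word) for word in data); then one run-length scan
  groupRuns (PySem.List.sorted (data.map (fun word => PySem.Str.len word)) (fun x => x))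

-- ===== PRECONDITION & SPEC =====
def Spec_countOfOccurencies (data : List String) (out : List (Int × Int)) : Prop := out = countOfOccurencies_alt data
instance (data : List String) (out : List (Int × Int)) : Decidable (Spec_countOfOccurencies data out) := by unfold Spec_countOfOccurencies; infer_instance

-- ===== CLAIM (what is proved, stated in full; the proofs are below) =====
def Claim_equal_countOfOccurencies : Prop := ∀ (data : List String), Dom_countOfOccurencies data → Spec_countOfOccurencies data (countOfOccurencies data)

-- ===== LEMMAS AND PROOFS =====

-- the common canonical value both ports are proved equal to
def pvTarget (L : List Int) : List (Int × Int) :=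
  (PySem.List.sorted (PySem.Set.ofList L) (fun x => x)).map (fun k => (k, (L.count k : Int)))

-- insertBy only compares the inserted element with elements of the accumulator
theorem insertBy_congr {α : Type} (before before' : α → α → Bool) (x : α) (acc : List α)
    (h : ∀ y ∈ acc, before x y = before' x y) :
    PySem.List.insertBy before x acc = PySem.List.insertBy before' x acc := by
  induction acc with
  | nil => rfl
  | cons y ys ih =>
    simp only [PySem.List.insertBy]
    rw [h y (by simp)]
    split
    · rfl
    · rw [ih (fun z hz => h z (by simp [hz]))]

theorem foldl_insertBy_congr_aux {α : Type} (before before' : α → α → Bool) (l0 : List α)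
    (h : ∀ a ∈ l0, ∀ b ∈ l0, before a b = before' a b) :
    ∀ (l acc : List α), (∀ y ∈ l, y ∈ l0) → (∀ y ∈ acc, y ∈ l0) →
      l.foldl (fun acc x => PySem.List.insertBy before x acc) acc
        = l.foldl (fun acc x => PySem.List.insertBy before' x acc) acc := by
  intro l
  induction l with
  | nil => intro acc _ _; rfl
  | cons x xs ih =>
    intro acc hl hacc
    have hx : x ∈ l0 := hl x (by simp)
    simp only [List.foldl_cons]
    rw [insertBy_congr before before' x acc (fun y hy => h x hx y (hacc y hy))]
    exact ih _ (fun y hy => hl y (by simp [hy]))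
      (fun y hy => by
        rw [PySem.List.mem_insertBy] at hy
        rcases hy with rfl | hy
        · exact hx
        · exact hacc y hy)

theorem foldl_insertBy_congr {α : Type} (before before' : α → α → Bool) (l : List α)
    (h : ∀ a ∈ l, ∀ b ∈ l, before a b = before' a b) :
    l.foldl (fun acc x => PySem.List.insertBy before x acc) []
      = l.foldl (fun acc x => PySem.List.insertBy before' x acc) [] :=
  foldl_insertBy_congr_aux before before' l h l [] (fun _ hy => hy) (by simp)

-- sorted2 by (fst, snd) is sorted by fst when the fst components are distinct
theorem sorted2_eq_sorted_fst (l : List (Int × Int)) (hnd : (l.map Prod.fst).Nodup) :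
    PySem.List.sorted2 l (fun p => p.1) (fun p => p.2)
      = PySem.List.sorted l (fun p => p.1) := by
  have hinj : ∀ a ∈ l, ∀ b ∈ l, a.1 = b.1 → a = b := by
    intro a ha b hb hab
    exact List.inj_on_of_nodup_map hnd ha hb hab
  unfold PySem.List.sorted2 PySem.List.sorted
  simp only [if_neg (by decide : ¬ (false = true))]
  apply foldl_insertBy_congr
  intro a ha b hb
  by_cases hab : a = b
  · subst hab; simp
  · have h1 : a.1 ≠ b.1 := fun he => hab (hinj a ha b hb he)
    by_cases hlt : a.1 < b.1
    · simp [hlt]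
    · have : b.1 < a.1 := lt_of_le_of_ne (not_lt.mp hlt) (fun he => h1 he.symm)
      simp [hlt, this]

-- the dict-building loop with a value depending only on the key
theorem items_foldl_insert_const (f : Int → Int) (l : List Int) (s : List Int) (hs : s.Nodup) :
    (l.foldl (fun d k => d.insert k (f k)) (PySem.Dict.mk (s.map (fun k => (k, f k))))).items
      = (PySem.Set.update s l).map (fun k => (k, f k)) := by
  induction l generalizing s with
  | nil => simp [PySem.Set.update]
  | cons x xs ih =>
    simp only [List.foldl_cons]
    have hcont : (PySem.Dict.mk (s.map (fun k => (k, f k)))).contains x = true ↔ x ∈ s := by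
      rw [PySem.Dict.contains_iff_mem_keys]
      simp [PySem.Dict.keys_mk, List.map_map, Function.comp]
    by_cases hx : x ∈ s
    · have h1 : (PySem.Dict.mk (s.map (fun k => (k, f k)))).insert x (f x)
          = PySem.Dict.mk (s.map (fun k => (k, f k))) := by
        apply PySem.Dict.ext
        rw [PySem.Dict.items_insert_of_contains _ _ (hcont.mpr hx)]
        simp only [List.map_map]
        apply List.map_congr_left
        intro k _
        by_cases hk : k = x
        · subst hk; simp
        · simp [Function.comp, hk]
      have h2 : PySem.Set.add s x = s := by
        simp [PySem.Set.add, PySem.Set.contains, hx]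
      rw [h1, ih s hs]
      simp only [PySem.Set.update, List.foldl_cons, h2]
    · have h1 : (PySem.Dict.mk (s.map (fun k => (k, f k)))).insert x (f x)
          = PySem.Dict.mk ((s ++ [x]).map (fun k => (k, f k))) := by
        apply PySem.Dict.ext
        rw [PySem.Dict.items_insert_of_not_contains _ _
          (Bool.eq_false_iff.mpr (fun hc => hx (hcont.mp hc)))]
        simp
      have h2 : PySem.Set.add s x = s ++ [x] := by
        simp only [PySem.Set.add, PySem.Set.contains]
        rw [if_neg (by simp [hx])]
      have hs' : (s ++ [x]).Nodup := by
        rw [List.nodup_append]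
        exact ⟨hs, List.nodup_singleton x, by intro a ha b hb; exact fun he => hx ((List.mem_singleton.mp hb ▸ he : a = x) ▸ ha)⟩
      rw [h1, ih (s ++ [x]) hs']
      simp only [PySem.Set.update, List.foldl_cons, h2]

theorem groupRuns_sorted (ms : List Int) (h : ms.Pairwise (· ≤ ·)) :
    groupRuns ms = pvTarget ms := by
  induction ms using groupRuns.induct with
  | case1 => simp [groupRuns, pvTarget, PySem.List.sorted_eq_nil_iff]
  | case2 x xs ih =>
    have hpxs : xs.Pairwise (· ≤ ·) := h.of_cons
    have hle : ∀ y ∈ xs, x ≤ y := fun y hy => List.rel_of_pairwise_cons h hy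
    set t := xs.takeWhile (· == x) with hts
    set dr := xs.dropWhile (· == x) with hds
    have hsplit : t ++ dr = xs := List.takeWhile_append_dropWhile
    have ht : ∀ y ∈ t, y = x := by
      intro y hy
      have := List.mem_takeWhile_imp hy
      simpa using this
    have hdr_pw : dr.Pairwise (· ≤ ·) := hpxs.sublist (List.dropWhile_sublist _)
    have hgt : ∀ y ∈ dr, x < y := by
      rcases hd : dr with _ | ⟨h0, r⟩
      · simp
      · have heq : List.dropWhile (· == x) xs = h0 :: r := by rw [← hds, hd]
        have hne : List.dropWhile (· == x) xs ≠ [] := by rw [heq]; simp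
        have hh0 : ¬ ((h0 == x) = true) := by
          have hf := List.head_dropWhile_not (· == x) hne
          simp only [heq, List.head_cons] at hf
          simp [hf]
        have hh0x : x < h0 := by
          have : h0 ∈ xs := (List.dropWhile_sublist _).mem (by rw [← hds, hd]; simp)
          exact lt_of_le_of_ne (hle h0 this) (fun he => hh0 (by simp [he.symm]))
        intro y hy
        rw [List.mem_cons] at hy
        rcases hy with rfl | hy
        · exact hh0x
        · have : h0 ≤ y := List.rel_of_pairwise_cons (hd ▸ hdr_pw) hy
          exact lt_of_lt_of_le hh0x this
    have hxnotdr : x ∉ dr := fun hx => lt_irrefl x (hgt x hx)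
    -- the head run is exactly all copies of x
    have hcount : (x :: xs).count x = t.length + 1 := by
      rw [List.count_cons_self, ← hsplit, List.count_append]
      rw [List.count_eq_length.mpr (fun b hb => (ht b hb).symm), List.count_eq_zero.mpr hxnotdr]
    -- the sorted distinct keys of x :: xs are x followed by those of dr
    have hkeys : PySem.List.sorted (PySem.Set.ofList (x :: xs)) (fun k => k)
        = x :: PySem.List.sorted (PySem.Set.ofList dr) (fun k => k) := by
      apply PySem.List.sorted_eq_of_perm_of_pairwise_lt
      · apply (List.perm_ext_iff_of_nodup ?_ ?_).mpr
        · intro y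
          rw [List.mem_cons, PySem.List.mem_sorted, PySem.Set.mem_ofList,
            PySem.Set.mem_ofList, List.mem_cons, ← hsplit, List.mem_append]
          constructor
          · rintro (rfl | hy)
            · exact Or.inl rfl
            · exact Or.inr (Or.inr hy)
          · rintro (rfl | hy | hy)
            · exact Or.inl rfl
            · exact Or.inl (ht y hy)
            · exact Or.inr hy
        · rw [List.nodup_cons]
          constructor
          · intro hx
            rw [PySem.List.mem_sorted, PySem.Set.mem_ofList] at hx
            exact hxnotdr hx
          · exact (PySem.List.sorted_perm _ _ _).nodup_iff.mpr (PySem.Set.nodup_ofList dr)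
        · exact PySem.Set.nodup_ofList (x :: xs)
      · rw [List.pairwise_cons]
        constructor
        · intro y hy
          rw [PySem.List.mem_sorted, PySem.Set.mem_ofList] at hy
          exact hgt y hy
        · exact PySem.List.sorted_ofList_pairwise_lt dr
    -- counts of the remaining keys are unaffected by dropping the head run
    have htail : (PySem.List.sorted (PySem.Set.ofList dr) (fun k => k)).map
          (fun k => (k, ((x :: xs).count k : Int)))
        = (PySem.List.sorted (PySem.Set.ofList dr) (fun k => k)).map
          (fun k => (k, (dr.count k : Int))) := by
      apply List.map_congr_left
      intro k hk
      rw [PySem.List.mem_sorted, PySem.Set.mem_ofList] at hk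
      have hkx : k ≠ x := fun he => lt_irrefl x (he ▸ hgt k hk)
      have hknt : k ∉ t := fun hkt => hkx (ht k hkt)
      rw [List.count_cons_of_ne (Ne.symm hkx), ← hsplit, List.count_append,
        List.count_eq_zero.mpr hknt, Nat.zero_add]
    rw [groupRuns, ih hdr_pw]
    unfold pvTarget
    rw [hkeys, List.map_cons, hcount, htail, ← hts]
    congr 2
    push_cast
    ring

theorem portA_eq_target (data : List String) :
    countOfOccurencies data = pvTarget (data.map (fun word => PySem.Str.len word)) := by
  simp only [countOfOccurencies]
  rw [PySem.List.foldl_append_singleton_eq_map, List.nil_append]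
  set L : List Int := data.map (fun word => PySem.Str.len word) with hL
  set g : Int → Int × Int := fun k => (k, (L.count k : Int)) with hg
  -- the dict-building loop: value inserted for key k is always count L k
  have hdict : (L.foldl
      (fun d length => d.insert length ((PySem.List.count L length : Nat) : Int))
      PySem.Dict.empty).items = (PySem.Set.ofList L).map g := by
    have := items_foldl_insert_const (fun k => ((PySem.List.count L k : Nat) : Int)) L [] (by simp)
    simp only [List.map_nil] at this
    rw [show (PySem.Dict.empty : PySem.Dict Int Int) = PySem.Dict.mk [] from rfl]
    rw [this]
    apply List.map_congr_left
    intro k _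
    simp [hg, PySem.List.count_eq]
  rw [hdict]
  -- sorting the items by the (key, value) tuple = sorting by the (distinct) keys
  have hfst : (((PySem.Set.ofList L).map g).map Prod.fst).Nodup := by
    simp only [List.map_map]
    have : (Prod.fst ∘ g) = id := by funext k; simp [hg]
    rw [this, List.map_id]
    exact PySem.Set.nodup_ofList L
  rw [sorted2_eq_sorted_fst _ hfst]
  have hsorted : PySem.List.sorted ((PySem.Set.ofList L).map g) (fun p => p.1)
      = pvTarget L := by
    apply PySem.List.sorted_eq_of_perm_of_pairwise_lt
    · exact (PySem.List.sorted_perm (PySem.Set.ofList L) (fun x => x) false).map g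
    · unfold pvTarget
      rw [List.pairwise_map]
      exact (PySem.List.sorted_ofList_pairwise_lt L).imp (fun h => h)
  rw [hsorted]
  -- dict() of a list of pairs with distinct keys keeps it as-is
  have hndnew : ((pvTarget L).map Prod.fst).Nodup := by
    unfold pvTarget
    simp only [List.map_map]
    have : (Prod.fst ∘ fun k => (k, (L.count k : Int))) = id := by funext k; rfl
    rw [this, List.map_id]
    exact List.Pairwise.imp (fun h => ne_of_lt h) (PySem.List.sorted_ofList_pairwise_lt L)
  show (PySem.Dict.ofList (pvTarget L)).items = pvTarget L
  unfold PySem.Dict.ofList PySem.Dict.update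
  rw [show (fun (acc : PySem.Dict Int Int) (p : Int × Int) => acc.insert p.1 p.2)
      = (fun (d : PySem.Dict Int Int) (a : Int × Int) => d.insert (Prod.fst a) (Prod.snd a)) from rfl]
  rw [PySem.Dict.items_foldl_insert_fresh (pvTarget L) Prod.fst Prod.snd PySem.Dict.empty
      (fun a _ => by simp [PySem.Dict.contains, PySem.Dict.empty]) hndnew]
  simp [PySem.Dict.empty]

theorem portB_eq_target (data : List String) :
    countOfOccurencies_alt data = pvTarget (data.map (fun word => PySem.Str.len word)) := by
  unfold countOfOccurencies_alt
  set L : List Int := data.map (fun word => PySem.Str.len word) with hL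
  set ms : List Int := PySem.List.sorted L (fun x => x) with hms
  have hperm : ms.Perm L := PySem.List.sorted_perm L (fun x => x) false
  rw [groupRuns_sorted ms (PySem.List.sorted_pairwise L (fun x => x))]
  unfold pvTarget
  have hkeys : PySem.List.sorted (PySem.Set.ofList ms) (fun x => x)
      = PySem.List.sorted (PySem.Set.ofList L) (fun x => x) := by
    apply PySem.List.sorted_eq_sorted_of_perm _ _ _ (fun a b hab => hab)
    apply (List.perm_ext_iff_of_nodup (PySem.Set.nodup_ofList ms) (PySem.Set.nodup_ofList L)).mpr
    intro y
    rw [PySem.Set.mem_ofList, PySem.Set.mem_ofList]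
    exact ⟨fun hy => hperm.mem_iff.mp hy, fun hy => hperm.mem_iff.mpr hy⟩
  rw [hkeys]
  apply List.map_congr_left
  intro k _
  rw [hperm.count_eq]

-- ===== VERDICT (by name: the statement is the Claim_ definition above) =====
theorem countOfOccurencies_spec : Claim_equal_countOfOccurencies := by
  intro data _
  unfold Spec_countOfOccurencies
  rw [portA_eq_target, portB_eq_target]
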